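-- pv_equiv track=rewrite | github.com/XyzHuy/-DL-Fine-tuning-coding-model | data/solution/Solution320.py | generateAbbreviations
-- ===== SOURCE A (Python) =====
-- from typing import List
--
-- def generateAbbreviations(word: str) -> List[str]:
--     def dfs(i: int) -> List[str]:
--         if i >= n:
--             return [""]
--         ans = [word[i] + s for s in dfs(i + 1)]
--         for j in range(i + 1, n + 1):
--             for s in dfs(j + 1):
--                 ans.append(str(j - i) + (word[j] if j < n else "") + s)
--         return ans
--
--     n = len(word)
--     return dfs(0)
-- ===== SOURCE B (Python) =====
-- from typing import List
--
-- def generateAbbreviations(word: str) -> List[str]: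
--     # Bottom-up DP: L[t] holds all abbreviations of word[i+1+t:], so each
--     # suffix's list is built exactly once (memoization of A's dfs).
--     n = len(word)
--     L = [[""], [""]]  # dp[n] and dp[n+1]
--     for i in range(n - 1, -1, -1):
--         ans = [word[i] + s for s in L[0]]
--         for j in range(i + 1, n + 1):
--             ans.extend(str(j - i) + (word[j] if j < n else "") + s for s in L[j - i])
--         L.insert(0, ans)
--     return L[0]
-- ===== Notes on version B (the rewrite author's own statement) =====
-- stated objective: alternative
-- what changed: Replaces A's naive recursion, which rebuilds each suffix's abbreviation list many times over, by a bottom-up table of suffix results so each suffix's list is computed exactly once (measured about 2.3x at n=16; both programs are dominated by the exponential output size).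
import Mathlib
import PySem

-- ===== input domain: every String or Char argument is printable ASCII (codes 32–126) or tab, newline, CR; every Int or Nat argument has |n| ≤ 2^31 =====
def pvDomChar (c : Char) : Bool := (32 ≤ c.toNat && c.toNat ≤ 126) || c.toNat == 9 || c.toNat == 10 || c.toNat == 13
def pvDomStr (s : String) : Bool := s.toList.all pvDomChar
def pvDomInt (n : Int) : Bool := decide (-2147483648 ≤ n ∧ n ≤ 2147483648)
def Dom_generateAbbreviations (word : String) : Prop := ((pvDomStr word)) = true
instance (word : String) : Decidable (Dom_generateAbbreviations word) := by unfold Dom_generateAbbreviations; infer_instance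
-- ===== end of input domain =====

-- B replaces A's recomputing recursion by a bottom-up table of suffix results,
-- each built exactly once (memoization); same output, same order.

-- ===== PORT A =====
-- A's inner dfs(i): naive recursion over the suffix index; word[i]/word[j] are
-- always in range in A (i < n, j < n on that branch), so List.getD is exact.
def dfsA (w : List Char) (n : Nat) (i : Nat) : List String :=
  if _h : i ≥ n then [""]
  else
    ((dfsA w n (i + 1)).map (fun s => (w.getD i ' ').toString ++ s)) ++
    ((List.range' (i + 1) (n - i)).attach.flatMap (fun j =>
      (dfsA w n (j.val + 1)).map (fun s =>
        PySem.Int.toStr ((j.val : Int) - (i : Int)) ++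
          (if j.val < n then (w.getD j.val ' ').toString else "") ++ s)))
termination_by n + 1 - i
decreasing_by
  · omega
  · have := List.mem_range'_1.mp j.property; omega

def generateAbbreviations (word : String) : List String :=
  dfsA word.toList word.toList.length 0

-- ===== PORT B =====
-- one row of the table: abbreviations of word[i:] given L = [dp[i+1], …, dp[n+1]]
def rowB (w : List Char) (n : Nat) (i : Nat) (L : List (List String)) : List String :=
  ((L.headD []).map (fun s => (w.getD i ' ').toString ++ s)) ++
  ((List.range' (i + 1) (n - i)).flatMap (fun j =>
    (L.getD (j - i) []).map (fun s =>
      PySem.Int.toStr ((j : Int) - (i : Int)) ++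
        (if j < n then (w.getD j ' ').toString else "") ++ s)))

-- the loop `for i in range(n-1, -1, -1): L.insert(0, ans)`; after k steps L = [dp[n-k], …, dp[n+1]]
def buildB (w : List Char) (n : Nat) : Nat → List (List String)
  | 0 => [[""], [""]]
  | k + 1 => rowB w n (n - (k + 1)) (buildB w n k) :: buildB w n k

def generateAbbreviations_alt (word : String) : List String :=
  (buildB word.toList word.toList.length word.toList.length).headD []

-- ===== PRECONDITION & SPEC =====
def Spec_generateAbbreviations (word : String) (out : List String) : Prop := out = generateAbbreviations_alt word
instance (word : String) (out : List String) : Decidable (Spec_generateAbbreviations word out) := by unfold Spec_generateAbbreviations; infer_instance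

-- ===== CLAIM (what is proved, stated in full; the proofs are below) =====
def Claim_equal_generateAbbreviations : Prop := ∀ (word : String), Dom_generateAbbreviations word → Spec_generateAbbreviations word (generateAbbreviations word)

-- ===== LEMMAS AND PROOFS =====

theorem dfsA_ge (w : List Char) (n i : Nat) (h : n ≤ i) : dfsA w n i = [""] := by
  rw [dfsA]; simp [h]

theorem rowB_eq_dfsA (w : List Char) (n i : Nat) (hi : i < n) :
    rowB w n i ((List.range (n - i + 1)).map (fun t => dfsA w n (i + 1 + t))) = dfsA w n i := by
  rw [dfsA]
  have hni : ¬ i ≥ n := by omega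
  simp only [hni, dite_false]
  unfold rowB
  congr 1
  · -- head part
    have h1 : n - i + 1 = (n - i) + 1 := rfl
    rw [h1, List.range_succ_eq_map]
    simp
  · -- flatMap part
    rw [List.flatMap_subtype, List.unattach_attach]
    intro j hj
    have hjr := List.mem_range'_1.mp hj
    have hget : (List.map (fun t => dfsA w n (i + 1 + t)) (List.range (n - i + 1))).getD (j - i) []
        = dfsA w n (j + 1) := by
      rw [List.getD_eq_getElem?_getD, List.getElem?_map, List.getElem?_range (by omega)]
      simp only [Option.map_some, Option.getD_some]
      congr 1
      omega
    rw [hget]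

theorem buildB_eq (w : List Char) (n : Nat) (k : Nat) (hk : k ≤ n) :
    buildB w n k = (List.range (k + 2)).map (fun t => dfsA w n (n - k + t)) := by
  induction k with
  | zero =>
    have : List.range 2 = [0, 1] := by decide
    simp [buildB, this, dfsA_ge w n n le_rfl, dfsA_ge w n (n + 1) (by omega)]
  | succ k ih =>
    have hk' : k ≤ n := by omega
    have ihk := ih hk'
    rw [buildB, ihk]
    have hR : List.range (k + 1 + 2) = 0 :: (List.range (k + 2)).map Nat.succ := by
      rw [show k + 1 + 2 = (k + 2) + 1 from rfl, List.range_succ_eq_map]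
    rw [hR]
    simp only [List.map_cons, List.map_map]
    congr 1
    · -- head
      have hi : n - (k + 1) < n := by omega
      have harg : (List.range (k + 2)).map (fun t => dfsA w n (n - k + t))
          = (List.range (n - (n - (k+1)) + 1)).map (fun t => dfsA w n ((n - (k+1)) + 1 + t)) := by
        have h1 : n - (n - (k + 1)) = k + 1 := by omega
        rw [h1]
        apply List.map_congr_left
        intro t _
        congr 1
        omega
      rw [harg, rowB_eq_dfsA w n (n - (k + 1)) hi]
      rfl
    · -- tail
      apply List.map_congr_left
      intro t _
      simp only [Function.comp]
      congr 1
      omega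

-- ===== VERDICT (by name: the statement is the Claim_ definition above) =====
theorem generateAbbreviations_spec : Claim_equal_generateAbbreviations := by
  intro word _
  unfold Spec_generateAbbreviations generateAbbreviations generateAbbreviations_alt
  set w := word.toList
  set n := w.length with hn
  rw [buildB_eq w n n le_rfl]
  rw [List.range_succ_eq_map]
  simp
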